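-- pv_equiv track=rewrite | github.com/andreamarton/MartonAndrea_INFOIII_LimbajeFormale | lab5/ex3.py | nfa_epsilon
-- ===== SOURCE A (Python) =====
-- def nfa_epsilon(input_string):
--     state = 0
--     i = 0
--
--     while i <= len(input_string):
--         if state == 0:
--             # q0 -> q1
--             state = 1
--         elif state == 1:
--             # q1 -> q2
--             state = 2
--         elif state == 2:
--             if i < len(input_string) and input_string[i] == 'B':
--                 # q2 -> q3 pe 'B'
--                 state = 3
--                 i += 1
--             else:
--                 return False
--         elif state == 3:
--             #  q3 -> q4
--             state = 4
--         elif state == 4: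
--             if i < len(input_string) and input_string[i] == 'A':
--                 #  q4 -> q5 pe 'A'
--                 state = 5
--                 i += 1
--             elif i < len(input_string) and input_string[i] == 'B':
--                 # q4 -> q6 pe 'B'
--                 state = 6
--                 i += 1
--             else:
--                 return False
--         elif state == 5 or state == 6:
--             #  q5/q6 -> q7
--             state = 7
--         elif state == 7:
--             # q7 -> q8
--             state = 8
--         elif state == 8:
--             if i < len(input_string) and input_string[i] == 'A':
--                 #  q8 -> q9 pe 'A'
--                 state = 9
--                 i += 1
--             elif i == len(input_string):
--                 #  q8 -> q0
--                 state = 0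
--             else:
--                 return False
--         elif state == 9:
--             return True
--         else:
--             return False
--
--     return state == 9
-- ===== SOURCE B (Python) =====
-- def nfa_epsilon(input_string):
--     return (len(input_string) >= 3
--             and input_string[0] == 'B'
--             and input_string[1] in ('A', 'B')
--             and input_string[2] == 'A')
-- ===== Notes on version B (the rewrite author's own statement) =====
-- stated objective: simpler
-- what changed: Replaced the hand-written epsilon-NFA simulation loop with a single closed-form boolean check that the string has length >= 3 and starts with B(A|B)A.
import Mathlib
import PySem

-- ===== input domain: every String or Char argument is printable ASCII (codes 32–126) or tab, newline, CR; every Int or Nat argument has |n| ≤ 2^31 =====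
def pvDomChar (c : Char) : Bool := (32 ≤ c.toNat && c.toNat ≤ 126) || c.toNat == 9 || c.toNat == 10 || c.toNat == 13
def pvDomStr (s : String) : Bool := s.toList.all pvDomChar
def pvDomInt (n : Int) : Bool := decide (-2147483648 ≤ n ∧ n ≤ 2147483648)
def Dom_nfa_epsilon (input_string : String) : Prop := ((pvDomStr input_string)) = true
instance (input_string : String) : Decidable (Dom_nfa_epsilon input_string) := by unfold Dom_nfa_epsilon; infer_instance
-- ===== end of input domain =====

-- B replaces A's hand-written epsilon-NFA simulation loop by a single closed-form
-- boolean check (length ≥ 3 and prefix B(A|B)A); objective: simpler.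

-- ===== PORT A =====
-- rank used only as a termination measure for A's while-loop (epsilon chains are bounded)
def pvRank (state : Nat) : Nat :=
  match state with
  | 0 => 2 | 1 => 1 | 2 => 0 | 3 => 1 | 4 => 0
  | 5 => 5 | 6 => 5 | 7 => 4 | 8 => 3 | _ => 0

-- the 'while i <= len(input_string)' loop, branch for branch
def nfaLoop (cs : List Char) (state : Nat) (i : Nat) : Bool :=
  if i ≤ cs.length then
    if state = 0 then nfaLoop cs 1 i
    else if state = 1 then nfaLoop cs 2 i
    else if state = 2 then
      if h : i < cs.length ∧ cs.getD i ' ' = 'B' then nfaLoop cs 3 (i + 1)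
      else false
    else if state = 3 then nfaLoop cs 4 i
    else if state = 4 then
      if h : i < cs.length ∧ cs.getD i ' ' = 'A' then nfaLoop cs 5 (i + 1)
      else if h' : i < cs.length ∧ cs.getD i ' ' = 'B' then nfaLoop cs 6 (i + 1)
      else false
    else if state = 5 ∨ state = 6 then nfaLoop cs 7 i
    else if state = 7 then nfaLoop cs 8 i
    else if state = 8 then
      if h : i < cs.length ∧ cs.getD i ' ' = 'A' then nfaLoop cs 9 (i + 1)
      else if i = cs.length then nfaLoop cs 0 i
      else false
    else if state = 9 then true
    else false
  else state == 9
termination_by 6 * (cs.length - i) + pvRank state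
decreasing_by
  all_goals try (rename_i h56; cases h56)
  all_goals simp_all only [pvRank]
  all_goals omega

def nfa_epsilon (input_string : String) : Bool := nfaLoop input_string.toList 0 0

-- ===== PORT B =====
def nfa_epsilon_alt (input_string : String) : Bool :=
  let cs := input_string.toList
  decide (3 ≤ cs.length) && (cs.getD 0 ' ' == 'B')
    && (cs.getD 1 ' ' == 'A' || cs.getD 1 ' ' == 'B')
    && (cs.getD 2 ' ' == 'A')
-- ===== PRECONDITION & SPEC =====
def Spec_nfa_epsilon (input_string : String) (out : Bool) : Prop := out = nfa_epsilon_alt input_string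
instance (input_string : String) (out : Bool) : Decidable (Spec_nfa_epsilon input_string out) := by unfold Spec_nfa_epsilon; infer_instance

-- ===== CLAIM (what is proved, stated in full; the proofs are below) =====
def Claim_equal_nfa_epsilon : Prop := ∀ (input_string : String), Dom_nfa_epsilon input_string → Spec_nfa_epsilon input_string (nfa_epsilon input_string)

-- ===== LEMMAS AND PROOFS =====
theorem nfaLoop_closed (cs : List Char) :
    nfaLoop cs 0 0 = ((decide (3 ≤ cs.length) && (cs.getD 0 ' ' == 'B')
      && (cs.getD 1 ' ' == 'A' || cs.getD 1 ' ' == 'B')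
      && (cs.getD 2 ' ' == 'A'))) := by
  match cs with
  | [] => simp [nfaLoop]
  | [a] => simp [nfaLoop]
  | [a, b] => by_cases hA : a = 'B' <;> simp [nfaLoop, hA]
  | a :: b :: c :: r =>
      by_cases hA : a = 'B' <;> by_cases hB1 : b = 'A' <;> by_cases hB2 : b = 'B' <;>
        by_cases hC : c = 'A' <;>
        simp [nfaLoop, hA, hB1, hB2, hC]

-- ===== VERDICT (by name: the statement is the Claim_ definition above) =====
theorem nfa_epsilon_spec : Claim_equal_nfa_epsilon := by
  intro s _
  unfold Spec_nfa_epsilon nfa_epsilon nfa_epsilon_alt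
  exact nfaLoop_closed s.toList
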